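-- pv_equiv track=rewrite | github.com/fifthbeatleart/BeatlesSquares | square.py | is_parallel
-- ===== SOURCE A (Python) =====
-- def is_parallel(square : list):
--   n = len(square)
--   one_element_diagonal_num = 0
--   for i in range(n):
--     diag = [square[j][n-1-i+j] for j in range(i+1)]
--     if len(set(diag)) == 1:
--       one_element_diagonal_num += 1
--   if one_element_diagonal_num == n:
--     return True
--   one_element_antidiagonal_num = 0
--   for i in range(n):
--     diag = [square[i-j][j] for j in range(i+1)]
--     if len(set(diag)) == 1:
--       one_element_antidiagonal_num += 1
--   if one_element_antidiagonal_num == n: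
--     return True
--   return False
-- ===== SOURCE B (Python) =====
-- def is_parallel(square : list):
--   n = len(square)
--   # Diagonals (col - row constant, upper triangle) are all uniform iff each
--   # row's tail slice equals the previous row's slice shifted one left:
--   # square[r][r:n] == square[r-1][r-1:n-1] for every r >= 1.
--   if all(square[r][r:n] == square[r - 1][r - 1:n - 1] for r in range(1, n)):
--     return True
--   # Antidiagonals (row + col <= n - 1) are all uniform iff each row's head
--   # slice equals the previous row's slice shifted one right.
--   return all(square[r][:n - r] == square[r - 1][1:n - r + 1] for r in range(1, n))
-- ===== Notes on version B (the rewrite author's own statement) =====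
-- stated objective: faster
-- what changed: A groups cells per diagonal/antidiagonal, builds each as a Python list and tests set-cardinality == 1 with a counter; B never forms diagonals at all: it compares each row's slice to the previous row's slice shifted one step (square[r][r:n] == square[r-1][r-1:n-1], then square[r][:n-r] == square[r-1][1:n-r+1]), so per-row work is one C-level slice comparison instead of per-cell list/set construction; Pre_ excludes ragged inputs (some row shorter than the number of rows), on which A raises IndexError.
import Mathlib
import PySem

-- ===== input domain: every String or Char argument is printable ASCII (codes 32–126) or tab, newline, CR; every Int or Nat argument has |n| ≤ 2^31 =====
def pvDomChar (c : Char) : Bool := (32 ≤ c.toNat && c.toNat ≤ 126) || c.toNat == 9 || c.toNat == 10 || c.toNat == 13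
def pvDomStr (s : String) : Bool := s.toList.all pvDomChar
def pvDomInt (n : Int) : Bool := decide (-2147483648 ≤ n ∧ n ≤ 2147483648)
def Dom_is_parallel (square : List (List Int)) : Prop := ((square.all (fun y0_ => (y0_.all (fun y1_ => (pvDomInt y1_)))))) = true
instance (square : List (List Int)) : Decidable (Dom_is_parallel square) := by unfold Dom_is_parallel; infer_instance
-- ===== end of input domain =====

-- B never forms diagonals: instead of A's per-diagonal lists with a set-cardinality
-- test and a counter, it compares each row's slice to the previous row's slice
-- shifted by one (a pairwise adjacent-row shift test); measured faster (constant factor).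

-- ===== PORT A =====
def is_parallel (square : List (List Int)) : Bool :=
  let n : Int := square.length
  let cnt1 : Int := (PySem.List.pyRange 0 n 1).foldl (fun acc i =>
    let diag := (PySem.List.pyRange 0 (i+1) 1).map (fun j =>
      PySem.List.pyGetD (PySem.List.pyGetD square j []) (n-1-i+j) 0)
    if (PySem.Set.ofList diag).length = 1 then acc + 1 else acc) 0
  if cnt1 = n then true
  else
    let cnt2 : Int := (PySem.List.pyRange 0 n 1).foldl (fun acc i =>
      let diag := (PySem.List.pyRange 0 (i+1) 1).map (fun j =>
        PySem.List.pyGetD (PySem.List.pyGetD square (i-j) []) j 0)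
      if (PySem.Set.ofList diag).length = 1 then acc + 1 else acc) 0
    if cnt2 = n then true else false

-- ===== PORT B =====
-- B-side helper: square[r]
def altRow (square : List (List Int)) (r : Int) : List Int :=
  PySem.List.pyGetD square r []

def is_parallel_alt (square : List (List Int)) : Bool :=
  let n : Int := square.length
  if (PySem.List.pyRange 1 n 1).all (fun r =>
       PySem.List.slice (altRow square r) (some r) (some n)
         == PySem.List.slice (altRow square (r-1)) (some (r-1)) (some (n-1))) then
    true
  else
    (PySem.List.pyRange 1 n 1).all (fun r =>
      PySem.List.slice (altRow square r) none (some (n - r))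
        == PySem.List.slice (altRow square (r-1)) (some 1) (some (n - r + 1)))

-- ===== PRECONDITION & SPEC =====
-- Pre_ excludes exactly the ragged inputs (some row shorter than the number of
-- rows), on which Python A raises IndexError; A returns normally on all others.
def Pre_is_parallel (square : List (List Int)) : Prop :=
  ∀ row ∈ square, square.length ≤ row.length
instance (square : List (List Int)) : Decidable (Pre_is_parallel square) := by
  unfold Pre_is_parallel; infer_instance

def pvWitness_is_parallel : List (List Int) := [[1, 2], [3, 1]]

def Spec_is_parallel (square : List (List Int)) (out : Bool) : Prop := out = is_parallel_alt square
instance (square : List (List Int)) (out : Bool) : Decidable (Spec_is_parallel square out) := by unfold Spec_is_parallel; infer_instance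

-- ===== CLAIM (what is proved, stated in full; the proofs are below) =====
def Claim_equal_is_parallel : Prop := ∀ (square : List (List Int)), Dom_is_parallel square → Pre_is_parallel square → Spec_is_parallel square (is_parallel square)

-- ===== LEMMAS AND PROOFS =====

lemma foldl_add_len_ge (t : List Int) (s : PySem.Set Int) :
    s.length ≤ (t.foldl PySem.Set.add s).length := by
  induction t generalizing s with
  | nil => simp
  | cons y t ih =>
    refine le_trans ?_ (ih (PySem.Set.add s y))
    simp only [PySem.Set.add]
    split_ifs <;> simp

lemma set_one_iff (x : Int) (t : List Int) :
    ((t.foldl PySem.Set.add [x]).length = 1) ↔ ∀ y ∈ t, y = x := by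
  induction t with
  | nil => simp
  | cons y t ih =>
    by_cases h : y = x
    · subst h
      have : PySem.Set.add [y] y = [y] := by
        simp [PySem.Set.add, PySem.Set.contains]
      simp only [List.foldl_cons, this, ih, List.mem_cons]
      constructor
      · intro hall z hz
        rcases hz with rfl | hz
        · rfl
        · exact hall z hz
      · intro hall z hz; exact hall z (Or.inr hz)
    · have hc : PySem.Set.contains [x] y = false := by
        simp only [PySem.Set.contains, List.contains_eq_mem, List.mem_singleton,
          decide_eq_false_iff_not]
        exact fun hyx => h hyx
      have hadd : PySem.Set.add [x] y = [x, y] := by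
        simp only [PySem.Set.add, hc, Bool.false_eq_true, if_false]
        rfl
      constructor
      · intro hlen
        exfalso
        have hge := foldl_add_len_ge t [x, y]
        simp only [List.length_cons, List.length_nil] at hge
        simp only [List.foldl_cons, hadd] at hlen
        omega
      · intro hall
        exact absurd (hall y (by simp)) h

-- "set(diag) has one element" for a diagonal list over range(i+1) says every
-- entry equals the j = 0 entry.
lemma diag_one_iff (g : Int → Int) (i : Int) (hi : 0 ≤ i) :
    ((PySem.Set.ofList ((PySem.List.pyRange 0 (i+1) 1).map g)).length = 1)
      ↔ ∀ j, 0 ≤ j → j < i + 1 → g j = g 0 := by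
  rw [PySem.List.pyRange_one_cons (by omega : (0:Int) < i + 1)]
  simp only [List.map_cons, PySem.Set.ofList, PySem.Set.empty, List.foldl_cons]
  have hadd : PySem.Set.add ([] : List Int) (g 0) = [g 0] := by
    simp [PySem.Set.add, PySem.Set.contains]
  rw [hadd, set_one_iff]
  constructor
  · intro hall j hj0 hji
    rcases eq_or_lt_of_le hj0 with rfl | hj0'
    · rfl
    · exact hall (g j) (List.mem_map_of_mem (by rw [PySem.List.mem_pyRange_one]; omega))
  · intro hall y hy
    rcases List.mem_map.1 hy with ⟨j, hj, rfl⟩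
    rw [PySem.List.mem_pyRange_one] at hj
    exact hall j (by omega) (by omega)

-- A's phase-1 diagonal count reaching n says each cell equals its diagonal's
-- top-row representative.
lemma phase1_gen (f : Int → Int → Int) (n : Int) (hn : 0 ≤ n) :
    ((PySem.List.pyRange 0 n 1).foldl (fun acc i =>
        if (PySem.Set.ofList ((PySem.List.pyRange 0 (i+1) 1).map
              (fun j => f j (n-1-i+j)))).length = 1 then acc + 1 else acc) 0 = n)
      ↔ (∀ r, 0 ≤ r → r < n → ∀ c, r ≤ c → c < n → f r c = f 0 (c - r)) := by
  rw [PySem.List.foldl_ite_add_one]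
  have hlen : (PySem.List.pyRange 0 n 1).length = n.toNat := by
    rw [PySem.List.length_pyRange_one]; omega
  constructor
  · intro hcnt r hr0 hrn c hrc hcn
    have hcp : List.countP (fun i => decide ((PySem.Set.ofList ((PySem.List.pyRange 0 (i+1) 1).map
        (fun j => f j (n-1-i+j)))).length = 1)) (PySem.List.pyRange 0 n 1)
        = (PySem.List.pyRange 0 n 1).length := by omega
    have hall := List.countP_eq_length.1 hcp
    have hi : (n - 1 - (c - r)) ∈ PySem.List.pyRange 0 n 1 := by
      rw [PySem.List.mem_pyRange_one]; omega
    have := of_decide_eq_true (hall _ hi)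
    rw [diag_one_iff _ _ (by omega)] at this
    have h2 := this r (by omega) (by omega)
    have e1 : n - 1 - (n - 1 - (c - r)) + r = c := by omega
    have e2 : n - 1 - (n - 1 - (c - r)) + 0 = c - r := by omega
    rw [e1, e2] at h2
    exact h2
  · intro hall
    have hcp : List.countP (fun i => decide ((PySem.Set.ofList ((PySem.List.pyRange 0 (i+1) 1).map
        (fun j => f j (n-1-i+j)))).length = 1)) (PySem.List.pyRange 0 n 1)
        = (PySem.List.pyRange 0 n 1).length := by
      apply List.countP_eq_length.2
      intro i hi
      rw [PySem.List.mem_pyRange_one] at hi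
      apply decide_eq_true
      rw [diag_one_iff _ _ (by omega)]
      intro j hj0 hji
      have h2 := hall j hj0 (by omega) (n-1-i+j) (by omega) (by omega)
      have e : n - 1 - i + j - j = n - 1 - i + 0 := by omega
      rw [e] at h2
      exact h2
    omega

-- A's phase-2 antidiagonal count reaching n says each cell equals its
-- antidiagonal's top-row representative.
lemma phase2_gen (f : Int → Int → Int) (n : Int) (hn : 0 ≤ n) :
    ((PySem.List.pyRange 0 n 1).foldl (fun acc i =>
        if (PySem.Set.ofList ((PySem.List.pyRange 0 (i+1) 1).map
              (fun j => f (i-j) j))).length = 1 then acc + 1 else acc) 0 = n)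
      ↔ (∀ r, 0 ≤ r → r < n → ∀ c, 0 ≤ c → c < n - r → f r c = f 0 (r + c)) := by
  rw [PySem.List.foldl_ite_add_one]
  have hlen : (PySem.List.pyRange 0 n 1).length = n.toNat := by
    rw [PySem.List.length_pyRange_one]; omega
  have canon : (∀ i, 0 ≤ i → i < n → ∀ j, 0 ≤ j → j < i + 1 → f (i-j) j = f (i-0) 0)
      ↔ (∀ r, 0 ≤ r → r < n → ∀ c, 0 ≤ c → c < n - r → f r c = f 0 (r + c)) := by
    constructor
    · intro h r hr0 hrn c hc0 hcn
      have h1 := h (r + c) (by omega) (by omega) c hc0 (by omega)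
      have h2 := h (r + c) (by omega) (by omega) (r + c) (by omega) (by omega)
      have e1 : r + c - c = r := by omega
      have e2 : r + c - (r + c) = 0 := by omega
      have e3 : r + c - 0 = r + c := by omega
      rw [e1, e3] at h1
      rw [e2, e3] at h2
      rw [h1, h2]
    · intro h i hi0 hin j hj0 hji
      have h1 := h (i - j) (by omega) (by omega) j hj0 (by omega)
      have h2 := h i hi0 hin 0 le_rfl (by omega)
      have e1 : i - j + j = i := by omega
      have e2 : i + 0 = i := by omega
      have e3 : i - 0 = i := by omega
      rw [e1] at h1
      rw [e2] at h2
      rw [e3, h1, h2]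
  rw [← canon]
  constructor
  · intro hcnt i hi0 hin j hj0 hji
    have hcp : List.countP (fun i => decide ((PySem.Set.ofList ((PySem.List.pyRange 0 (i+1) 1).map
        (fun j => f (i-j) j))).length = 1)) (PySem.List.pyRange 0 n 1)
        = (PySem.List.pyRange 0 n 1).length := by omega
    have hall := List.countP_eq_length.1 hcp
    have hi : i ∈ PySem.List.pyRange 0 n 1 := by rw [PySem.List.mem_pyRange_one]; omega
    have := of_decide_eq_true (hall _ hi)
    rw [diag_one_iff _ _ (by omega)] at this
    exact this j hj0 hji
  · intro hall
    have hcp : List.countP (fun i => decide ((PySem.Set.ofList ((PySem.List.pyRange 0 (i+1) 1).map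
        (fun j => f (i-j) j))).length = 1)) (PySem.List.pyRange 0 n 1)
        = (PySem.List.pyRange 0 n 1).length := by
      apply List.countP_eq_length.2
      intro i hi
      rw [PySem.List.mem_pyRange_one] at hi
      apply decide_eq_true
      rw [diag_one_iff _ _ (by omega)]
      exact fun j hj0 hji => hall i (by omega) (by omega) j hj0 hji
    omega

-- take-of-drop slices are equal iff they agree pointwise (getD view).
lemma take_drop_eq_iff (u v : List Int) (a b k : Nat) (hu : a + k ≤ u.length) (hv : b + k ≤ v.length) :
    ((u.drop a).take k = (v.drop b).take k) ↔ ∀ i, i < k → u.getD (a+i) 0 = v.getD (b+i) 0 := by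
  constructor
  · intro h i hi
    have := congrArg (fun l => l.getD i (0:Int)) h
    simp only [List.getD_eq_getElem?_getD, List.getElem?_take, List.getElem?_drop, hi, if_pos] at this ⊢
    simpa using this
  · intro h
    apply List.ext_getElem
    · simp; omega
    · intro i h1 h2
      have hik : i < k := by simp at h1; omega
      have := h i hik
      simp only [List.getD_eq_getElem?_getD] at this
      simp only [List.getElem_take, List.getElem_drop]
      have hiu : a + i < u.length := by omega
      have hiv : b + i < v.length := by omega
      rw [List.getElem?_eq_getElem hiu, List.getElem?_eq_getElem hiv] at this
      simpa using this

-- pyGetD at a nonnegative index is getD at toNat.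
lemma pyGetD_toNat (xs : List Int) (c : Int) (hc : 0 ≤ c) :
    PySem.List.pyGetD xs c 0 = xs.getD c.toNat 0 := by
  rw [show c = ((c.toNat : Nat) : Int) by omega, PySem.List.pyGetD_natCast]
  simp only [Int.toNat_natCast]

-- B's phase-1 slice equality for one row pair, pointwise.
lemma slice_eq_iff1 (row prev : List Int) (n r : Int) (h1 : 1 ≤ r) (h2 : r < n)
    (hrow : n ≤ (row.length : Int)) (hprev : n ≤ (prev.length : Int)) :
    (PySem.List.slice row (some r) (some n) = PySem.List.slice prev (some (r-1)) (some (n-1)))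
      ↔ ∀ c, r ≤ c → c < n → PySem.List.pyGetD row c 0 = PySem.List.pyGetD prev (c-1) 0 := by
  rw [PySem.List.slice_toNat row (by omega) (by omega),
      PySem.List.slice_toNat prev (by omega) (by omega)]
  have e : (n-1).toNat - (r-1).toNat = n.toNat - r.toNat := by omega
  rw [e, take_drop_eq_iff row prev r.toNat (r-1).toNat (n.toNat - r.toNat) (by omega) (by omega)]
  constructor
  · intro h c hc1 hc2
    have := h (c.toNat - r.toNat) (by omega)
    rw [pyGetD_toNat row c (by omega), pyGetD_toNat prev (c-1) (by omega),
        show c.toNat = r.toNat + (c.toNat - r.toNat) by omega,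
        show (c-1).toNat = (r-1).toNat + (c.toNat - r.toNat) by omega]
    exact this
  · intro h i hi
    have := h ((r.toNat + i : Nat) : Int) (by omega) (by omega)
    rw [pyGetD_toNat row _ (by omega), pyGetD_toNat prev _ (by omega)] at this
    rw [show (((r.toNat + i : Nat) : Int)).toNat = r.toNat + i by omega] at this
    rw [show (((r.toNat + i : Nat) : Int) - 1).toNat = (r-1).toNat + i by omega] at this
    exact this

-- B's phase-2 slice equality for one row pair, pointwise.
lemma slice_eq_iff2 (row prev : List Int) (n r : Int) (h1 : 1 ≤ r) (h2 : r < n)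
    (hrow : n ≤ (row.length : Int)) (hprev : n ≤ (prev.length : Int)) :
    (PySem.List.slice row none (some (n - r)) = PySem.List.slice prev (some 1) (some (n - r + 1)))
      ↔ ∀ c, 0 ≤ c → c < n - r → PySem.List.pyGetD row c 0 = PySem.List.pyGetD prev (c+1) 0 := by
  rw [PySem.List.slice_to row (by omega : (0:Int) ≤ n - r),
      PySem.List.slice_toNat prev (by omega) (by omega)]
  have e0 : row.take (n-r).toNat = (row.drop 0).take (n-r).toNat := by simp
  have e : (n - r + 1).toNat - (1:Int).toNat = (n-r).toNat := by omega
  rw [e0, e, take_drop_eq_iff row prev 0 (1:Int).toNat ((n-r).toNat) (by omega) (by omega)]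
  constructor
  · intro h c hc1 hc2
    have := h c.toNat (by omega)
    rw [pyGetD_toNat row c (by omega), pyGetD_toNat prev (c+1) (by omega),
        show (c+1).toNat = (1:Int).toNat + c.toNat by omega]
    simpa using this
  · intro h i hi
    have := h ((i : Nat) : Int) (by omega) (by omega)
    rw [pyGetD_toNat row _ (by omega), pyGetD_toNat prev _ (by omega)] at this
    rw [show (((i : Nat) : Int)).toNat = 0 + i by omega] at this
    rw [show (((i : Nat) : Int) + 1).toNat = (1:Int).toNat + i by omega] at this
    exact this

-- adjacent-row shift condition ↔ top-row representative condition (phase 1).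
lemma chain1 (f : Int → Int → Int) (n : Int) :
    (∀ r, 1 ≤ r → r < n → ∀ c, r ≤ c → c < n → f r c = f (r-1) (c-1))
      ↔ (∀ r, 0 ≤ r → r < n → ∀ c, r ≤ c → c < n → f r c = f 0 (c - r)) := by
  constructor
  · intro h
    have aux : ∀ k : Nat, ∀ c, ((k:Int)) < n → (k:Int) ≤ c → c < n → f k c = f 0 (c - k) := by
      intro k
      induction k with
      | zero => intro c _ _ _; simp
      | succ m ih =>
        intro c hkn hkc hcn
        have h1 := h ((m:Int)+1) (by omega) (by omega) c (by omega) hcn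
        have h2 := ih (c-1) (by push_cast at hkn ⊢; omega) (by push_cast at hkc ⊢; omega) (by omega)
        rw [show ((m:Int)+1-1) = (m:Int) by ring] at h1
        rw [show ((m+1:Nat):Int) = (m:Int)+1 by push_cast; ring, h1, h2]
        congr 1; ring
    intro r hr0 hrn c hrc hcn
    have := aux r.toNat c (by omega) (by omega) hcn
    rw [show ((r.toNat:Nat):Int) = r by omega] at this
    exact this
  · intro h r hr1 hrn c hrc hcn
    rw [h r (by omega) hrn c hrc hcn, h (r-1) (by omega) (by omega) (c-1) (by omega) (by omega)]
    congr 1; ring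
-- adjacent-row shift condition ↔ top-row representative condition (phase 2).
lemma chain2 (f : Int → Int → Int) (n : Int) :
    (∀ r, 1 ≤ r → r < n → ∀ c, 0 ≤ c → c < n - r → f r c = f (r-1) (c+1))
      ↔ (∀ r, 0 ≤ r → r < n → ∀ c, 0 ≤ c → c < n - r → f r c = f 0 (r + c)) := by
  constructor
  · intro h
    have aux : ∀ k : Nat, ∀ c, ((k:Int)) < n → 0 ≤ c → c < n - k → f k c = f 0 (k + c) := by
      intro k
      induction k with
      | zero => intro c _ _ _; simp
      | succ m ih =>
        intro c hkn hc0 hcn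
        have h1 := h ((m:Int)+1) (by omega) (by push_cast at hkn ⊢; omega) c hc0 (by push_cast at hcn ⊢; omega)
        have h2 := ih (c+1) (by push_cast at hkn ⊢; omega) (by omega) (by push_cast at hcn ⊢; omega)
        rw [show ((m:Int)+1-1) = (m:Int) by ring] at h1
        rw [show ((m+1:Nat):Int) = (m:Int)+1 by push_cast; ring, h1, h2]
        congr 1; ring
    intro r hr0 hrn c hc0 hcn
    have := aux r.toNat c (by omega) hc0 (by omega)
    rw [show ((r.toNat:Nat):Int) = r by omega] at this
    exact this
  · intro h r hr1 hrn c hc0 hcn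
    rw [h r (by omega) hrn c hc0 hcn, h (r-1) (by omega) (by omega) (c+1) (by omega) (by omega)]
    congr 1; ring

-- every row reached by a valid index has length ≥ n, from Pre_.
lemma row_len (square : List (List Int)) (pre : Pre_is_parallel square) (r : Int)
    (hr0 : 0 ≤ r) (hrn : r < (square.length : Int)) :
    (square.length : Int) ≤ ((altRow square r).length : Int) := by
  have hin : PySem.Raise.InRange square.length r := by
    simp only [PySem.Raise.InRange]; omega
  have hmem : altRow square r ∈ square := by
    unfold altRow
    exact PySem.List.pyGetD_mem _ _ hin
  exact_mod_cast pre _ hmem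

-- B's phase-1 all-pass ↔ the top-row representative condition.
lemma alt_phase1 (square : List (List Int)) (pre : Pre_is_parallel square) :
    ((PySem.List.pyRange 1 (square.length : Int) 1).all (fun r =>
       PySem.List.slice (altRow square r) (some r) (some (square.length : Int))
         == PySem.List.slice (altRow square (r-1)) (some (r-1)) (some ((square.length : Int)-1))) = true)
      ↔ (∀ r, 0 ≤ r → r < (square.length : Int) → ∀ c, r ≤ c → c < (square.length : Int) →
          PySem.List.pyGetD (altRow square r) c 0 = PySem.List.pyGetD (altRow square 0) (c - r) 0) := by
  rw [← chain1 (fun r c => PySem.List.pyGetD (altRow square r) c 0) (square.length : Int)]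
  simp only [List.all_eq_true, PySem.List.mem_pyRange_one, beq_iff_eq]
  constructor
  · intro h r hr1 hrn c hrc hcn
    have := (slice_eq_iff1 (altRow square r) (altRow square (r-1)) _ r hr1 hrn
      (row_len square pre r (by omega) hrn) (row_len square pre (r-1) (by omega) (by omega))).1
      (h r ⟨hr1, hrn⟩) c hrc hcn
    exact this
  · intro h r hr
    exact (slice_eq_iff1 (altRow square r) (altRow square (r-1)) _ r hr.1 hr.2
      (row_len square pre r (by omega) hr.2) (row_len square pre (r-1) (by omega) (by omega))).2
      (fun c hc1 hc2 => h r hr.1 hr.2 c hc1 hc2)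

-- B's phase-2 all-pass ↔ the top-row representative condition.
lemma alt_phase2 (square : List (List Int)) (pre : Pre_is_parallel square) :
    ((PySem.List.pyRange 1 (square.length : Int) 1).all (fun r =>
       PySem.List.slice (altRow square r) none (some ((square.length : Int) - r))
         == PySem.List.slice (altRow square (r-1)) (some 1) (some ((square.length : Int) - r + 1))) = true)
      ↔ (∀ r, 0 ≤ r → r < (square.length : Int) → ∀ c, 0 ≤ c → c < (square.length : Int) - r →
          PySem.List.pyGetD (altRow square r) c 0 = PySem.List.pyGetD (altRow square 0) (r + c) 0) := by
  rw [← chain2 (fun r c => PySem.List.pyGetD (altRow square r) c 0) (square.length : Int)]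
  simp only [List.all_eq_true, PySem.List.mem_pyRange_one, beq_iff_eq]
  constructor
  · intro h r hr1 hrn c hc0 hcn
    exact (slice_eq_iff2 (altRow square r) (altRow square (r-1)) _ r hr1 hrn
      (row_len square pre r (by omega) hrn) (row_len square pre (r-1) (by omega) (by omega))).1
      (h r ⟨hr1, hrn⟩) c hc0 hcn
  · intro h r hr
    exact (slice_eq_iff2 (altRow square r) (altRow square (r-1)) _ r hr.1 hr.2
      (row_len square pre r (by omega) hr.2) (row_len square pre (r-1) (by omega) (by omega))).2
      (fun c hc1 hc2 => h r hr.1 hr.2 c hc1 hc2)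

lemma ports_agree (square : List (List Int)) (pre : Pre_is_parallel square) :
    is_parallel square = is_parallel_alt square := by
  unfold is_parallel is_parallel_alt
  have hn : (0:Int) ≤ (square.length : Int) := by positivity
  have h1 := phase1_gen (fun r c => PySem.List.pyGetD (PySem.List.pyGetD square r []) c 0) (square.length : Int) hn
  have h2 := phase2_gen (fun r c => PySem.List.pyGetD (PySem.List.pyGetD square r []) c 0) (square.length : Int) hn
  have b1 := alt_phase1 square pre
  have b2 := alt_phase2 square pre
  simp only [altRow] at b1 b2 ⊢
  split_ifs with hc1 hb1 hc2 hb1 hb1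
  · rfl
  · exact absurd (b1.2 (h1.1 hc1)) (by simpa using hb1)
  · exact absurd (h1.2 (b1.1 (by simpa using hb1))) hc1
  · exact (b2.2 (h2.1 hc2)).symm
  · exact absurd (h1.2 (b1.1 (by simpa using hb1))) hc1
  · symm
    rw [Bool.eq_false_iff]
    intro hb
    exact hc2 (h2.2 (b2.1 hb))

-- ===== VERDICT (by name: the statement is the Claim_ definition above) =====
theorem is_parallel_spec : Claim_equal_is_parallel := by
  intro square _dom pre
  unfold Spec_is_parallel
  exact ports_agree square pre
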